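-- pv_equiv track=rewrite | github.com/ObywatelTB/Sentiment-Analysis | sentanalysis/nltk_utils.py | to_wn
-- ===== SOURCE A (Python) =====
-- def to_wn(tupla):
--     """Creating wordnet tags"""
--     [word, tag] = tupla
--     di = {('N','U'):'n',
--             'V':'v',
--             'J':'a',
--             ('R','W'):'r'}
--     for key in di:
--         if tag.startswith(key):
--             return (word, di[key])
--     return (word, '')
-- ===== SOURCE B (Python) =====
-- def to_wn(tupla):
--     """Creating wordnet tags"""
--     [word, tag] = tupla
--     table = {'N': 'n', 'U': 'n', 'V': 'v', 'J': 'a', 'R': 'r', 'W': 'r'}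
--     return (word, table.get(tag[:1], ''))
-- ===== Notes on version B (the rewrite author's own statement) =====
-- stated objective: idiomatic
-- what changed: Replaces the ordered scan over tuple/str dict keys with tuple-aware startswith by a single flat first-character-to-letter dict lookup with tag[:1] and a default.
import Mathlib
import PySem

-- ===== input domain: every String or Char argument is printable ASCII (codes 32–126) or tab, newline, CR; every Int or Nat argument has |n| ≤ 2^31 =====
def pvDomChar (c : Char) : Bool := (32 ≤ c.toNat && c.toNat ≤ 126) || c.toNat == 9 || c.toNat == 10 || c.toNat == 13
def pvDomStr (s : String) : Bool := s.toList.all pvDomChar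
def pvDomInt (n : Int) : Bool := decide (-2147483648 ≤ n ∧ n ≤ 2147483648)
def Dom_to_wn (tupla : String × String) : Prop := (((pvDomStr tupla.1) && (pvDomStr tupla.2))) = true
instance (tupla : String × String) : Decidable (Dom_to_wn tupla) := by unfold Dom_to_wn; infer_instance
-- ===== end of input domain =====

-- B replaces A's ordered scan over dict keys (with tuple-aware startswith) by one flat first-char dict lookup; idiomatic, same values.
-- ===== PORT A =====
-- literal port of A: iterate the dict's keys in insertion order, first startswith match wins
def to_wn (tupla : String × String) : String × String :=
  let word := tupla.1
  let tag := tupla.2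
  if PySem.Str.startswith tag "N" || PySem.Str.startswith tag "U" then (word, "n")
  else if PySem.Str.startswith tag "V" then (word, "v")
  else if PySem.Str.startswith tag "J" then (word, "a")
  else if PySem.Str.startswith tag "R" || PySem.Str.startswith tag "W" then (word, "r")
  else (word, "")

-- ===== PORT B =====
def to_wn_alt (tupla : String × String) : String × String :=
  let word := tupla.1
  let tag := tupla.2
  let table : PySem.Dict String String :=
    PySem.Dict.ofList [("N", "n"), ("U", "n"), ("V", "v"), ("J", "a"), ("R", "r"), ("W", "r")]
  (word, table.getD (PySem.Str.slice tag none (some 1)) "")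

-- ===== PRECONDITION & SPEC =====
def Spec_to_wn (tupla : String × String) (out : String × String) : Prop := out = to_wn_alt tupla
instance (tupla : String × String) (out : String × String) : Decidable (Spec_to_wn tupla out) := by unfold Spec_to_wn; infer_instance

-- ===== CLAIM (what is proved, stated in full; the proofs are below) =====
def Claim_equal_to_wn : Prop := ∀ (tupla : String × String), Dom_to_wn tupla → Spec_to_wn tupla (to_wn tupla)

-- ===== LEMMAS AND PROOFS =====

-- ===== VERDICT (by name: the statement is the Claim_ definition above) =====
lemma beq_ofList_single (s : String) (c : Char) : (s == String.ofList [c]) = (s.toList == [c]) := by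
  rw [Bool.eq_iff_iff]
  simp only [beq_iff_eq]
  constructor
  · intro h; rw [h]; simp
  · intro h; have h2 := String.ofList_toList (s := s); rw [← h2, h]

-- ===== VERDICT (by name: the statement is the Claim_ definition above) =====
theorem to_wn_spec : Claim_equal_to_wn := by
  intro ⟨word, tag⟩ _
  unfold Spec_to_wn to_wn to_wn_alt
  rcases h : tag.toList with _ | ⟨c, rest⟩ <;>
    simp only [PySem.Dict.ofList, PySem.Str.startswith, PySem.Chars.startswith, PySem.Str.slice,
      PySem.Chars.slice, PySem.List.slice, PySem.Dict.getD, PySem.Dict.get?, h,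
      PySem.Dict.update, PySem.Dict.empty, PySem.Dict.insert] <;>
    simp [List.find?, beq_ofList_single, PySem.Dict.insert, h]
  split_ifs with h1 h2 h3 h4
  · rcases h1 with rfl | rfl <;> simp
  · subst h2; simp
  · subst h3; simp
  · rcases h4 with rfl | rfl <;> simp_all
  · rw [not_or] at h4
    have e1 : ('N' == c) = false := by simpa using (not_or.mp h1).1
    have e2 : ('U' == c) = false := by simpa using (not_or.mp h1).2
    have e3 : ('V' == c) = false := by simpa using h2
    have e4 : ('J' == c) = false := by simpa using h3
    have e5 : ('R' == c) = false := by simpa using h4.1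
    have e6 : ('W' == c) = false := by simpa using h4.2
    simp [e1, e2, e3, e4, e5, e6]
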